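-- pv_equiv track=rewrite | github.com/Fondamenti18/fondamenti-di-programmazione | students/1811110/homework04/program03.py | cond_c_a
-- ===== SOURCE A (Python) =====
-- def selett(selettore):
--     selett=selettore[1:]
--     return selett
--
-- def cond_c_a(selettore,d,padr,fig,guardia):
--     if '#' in selettore:
--         selettore=selett(selettore)
--         guardia='id'
--     else:
--         for x in selettore:
--             if d==0:
--                 if x!=' ':
--                     if x.isalpha()==True:
--                         padr+=x
--                 else:
--                     d=1
--             else:
--                 if x.isalpha()==True:
--                     fig+=x
--     return padr,fig,guardia
-- ===== SOURCE B (Python) =====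
-- def cond_c_a(selettore, d, padr, fig, guardia):
--     if '#' in selettore:
--         return padr, fig, 'id'
--     if d != 0:
--         return padr, fig + _alpha(selettore), guardia
--     head, sep, tail = selettore.partition(' ')
--     padr += _alpha(head)
--     if sep:
--         fig += _alpha(tail)
--     return padr, fig, guardia
--
-- def _alpha(s):
--     return ''.join(c for c in s if c.isalpha())
-- ===== Notes on version B (the rewrite author's own statement) =====
-- stated objective: simpler
-- what changed: Replaces the stateful per-character loop with a d flag by a single partition at the first space and two alpha-filters of the resulting halves (plus the whole-string-to-fig case when d is already nonzero).
import Mathlib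
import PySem

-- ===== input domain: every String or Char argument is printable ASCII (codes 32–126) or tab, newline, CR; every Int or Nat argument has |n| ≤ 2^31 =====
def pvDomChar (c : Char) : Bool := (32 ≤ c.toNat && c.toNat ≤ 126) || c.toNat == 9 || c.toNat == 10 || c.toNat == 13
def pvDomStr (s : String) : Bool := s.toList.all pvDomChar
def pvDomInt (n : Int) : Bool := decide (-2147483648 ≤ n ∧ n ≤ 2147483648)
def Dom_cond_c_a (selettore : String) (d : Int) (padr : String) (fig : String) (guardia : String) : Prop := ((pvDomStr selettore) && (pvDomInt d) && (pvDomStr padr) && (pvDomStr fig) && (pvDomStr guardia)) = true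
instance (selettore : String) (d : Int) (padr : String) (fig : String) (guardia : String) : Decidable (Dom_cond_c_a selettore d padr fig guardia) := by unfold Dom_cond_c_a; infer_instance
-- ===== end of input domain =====

-- B replaces A's stateful character loop (flag d) by one partition at the first space and two alpha-filters: simpler decomposition, same values.


-- ===== PORT A =====
-- the body of A's for-loop, on state (d, padr, fig)
def pvStep (s : Int × List Char × List Char) (x : Char) : Int × List Char × List Char :=
  if s.1 == 0 then
    if x ≠ ' ' then
      if PySem.Chars.isalpha x = true then (s.1, s.2.1 ++ [x], s.2.2) else s
    else (1, s.2.1, s.2.2)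
  else
    if PySem.Chars.isalpha x = true then (s.1, s.2.1, s.2.2 ++ [x]) else s

def cond_c_a (selettore : String) (d : Int) (padr : String) (fig : String) (guardia : String) : String × String × String :=
  if selettore.toList.contains '#' then
    -- A rebinds selettore locally (unused for the result) and sets guardia='id'
    (padr, fig, "id")
  else
    let st := selettore.toList.foldl pvStep (d, padr.toList, fig.toList)
    (String.ofList st.2.1, String.ofList st.2.2, guardia)


-- ===== PORT B =====
def pvAlpha (cs : List Char) : List Char := cs.filter PySem.Chars.isalpha

def cond_c_a_alt (selettore : String) (d : Int) (padr : String) (fig : String) (guardia : String) : String × String × String :=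
  if selettore.toList.contains '#' then
    (padr, fig, "id")
  else if d ≠ 0 then
    (padr, String.ofList (fig.toList ++ pvAlpha selettore.toList), guardia)
  else
    let cs := selettore.toList
    let head := cs.takeWhile (· ≠ ' ')
    let tail := (cs.dropWhile (· ≠ ' ')).drop 1
    let padr' := String.ofList (padr.toList ++ pvAlpha head)
    if cs.contains ' ' then (padr', String.ofList (fig.toList ++ pvAlpha tail), guardia)
    else (padr', fig, guardia)


-- ===== PRECONDITION & SPEC =====
def Spec_cond_c_a (selettore : String) (d : Int) (padr : String) (fig : String) (guardia : String) (out : String × String × String) : Prop := out = cond_c_a_alt selettore d padr fig guardia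
instance (selettore : String) (d : Int) (padr : String) (fig : String) (guardia : String) (out : String × String × String) : Decidable (Spec_cond_c_a selettore d padr fig guardia out) := by unfold Spec_cond_c_a; infer_instance

-- ===== CLAIM (what is proved, stated in full; the proofs are below) =====
def Claim_equal_cond_c_a : Prop := ∀ (selettore : String) (d : Int) (padr : String) (fig : String) (guardia : String), Dom_cond_c_a selettore d padr fig guardia → Spec_cond_c_a selettore d padr fig guardia (cond_c_a selettore d padr fig guardia)

-- ===== LEMMAS AND PROOFS =====

theorem pvFoldl_ne_zero (d : Int) (hd : d ≠ 0) (cs : List Char) (p f : List Char) :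
    cs.foldl pvStep (d, p, f) = (d, p, f ++ pvAlpha cs) := by
  induction cs generalizing f with
  | nil => simp [pvAlpha]
  | cons x cs ih =>
    simp only [List.foldl_cons, pvStep, beq_iff_eq, if_neg hd]
    by_cases hx : PySem.Chars.isalpha x = true
    · simp [hx, ih, pvAlpha]
    · simp [hx, ih, pvAlpha]

theorem pvFoldl_zero (cs : List Char) (p f : List Char) :
    cs.foldl pvStep ((0 : Int), p, f) =
      if cs.contains ' ' then
        (1, p ++ pvAlpha (cs.takeWhile (· ≠ ' ')),
         f ++ pvAlpha ((cs.dropWhile (· ≠ ' ')).drop 1))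
      else (0, p ++ pvAlpha cs, f) := by
  induction cs generalizing p with
  | nil => simp [pvAlpha]
  | cons x cs ih =>
    by_cases hsp : x = ' '
    · subst hsp
      simp only [List.foldl_cons, pvStep]
      norm_num
      rw [pvFoldl_ne_zero 1 (by norm_num)]
      simp [pvAlpha]
    · have hsp' : ¬ (' ' = x) := fun h => hsp h.symm
      simp only [List.foldl_cons, pvStep, beq_iff_eq, if_neg hsp, ite_not]
      by_cases hx : PySem.Chars.isalpha x = true
      · simp [hsp, hsp', hx, ih, pvAlpha]
      · simp [hsp, hsp', hx, ih, pvAlpha]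

-- ===== VERDICT (by name: the statement is the Claim_ definition above) =====
theorem cond_c_a_spec : Claim_equal_cond_c_a := by
  intro selettore d padr fig guardia _
  unfold Spec_cond_c_a cond_c_a cond_c_a_alt
  by_cases hh : '#' ∈ selettore.toList
  · simp [hh]
  · by_cases hd : d = 0
    · subst hd
      simp only [List.contains_eq_mem, hh, decide_false, Bool.false_eq_true, if_false,
        if_neg (by simp : ¬ ((0:Int) ≠ 0))]
      rw [pvFoldl_zero]
      by_cases hsp : ' ' ∈ selettore.toList
      · simp [hsp]
      · have ht : List.takeWhile (fun x => !decide (x = ' ')) selettore.toList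
            = selettore.toList := by
          rw [List.takeWhile_eq_self_iff]
          exact fun a ha => by simp; exact fun h => hsp (h ▸ ha)
        simp [hsp, ht]
    · simp [hh, hd, pvFoldl_ne_zero d hd]
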